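-- pv_equiv track=rewrite | github.com/Albadit/live_mocap | live_mocap_addon/utils/naming.py | fuzzy_match_bone
-- ===== SOURCE A (Python) =====
-- from typing import List, Optional
--
-- def normalize_bone_name(name: str) -> str:
--     """
--     Normalize a bone name for comparison.
--
--     Args:
--         name: Bone name to normalize
--
--     Returns:
--         Normalized bone name (lowercase, stripped)
--     """
--     return name.lower().strip()
--
-- def fuzzy_match_bone(bone_name: str, candidate_names: List[str]) -> Optional[str]:
--     """
--     Find the best matching bone from a list of candidates.
--
--     Args:
--         bone_name: Target bone name from the armature
--         candidate_names: List of candidate patterns to match against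
--
--     Returns:
--         Best matching candidate name, or None if no match
--     """
--     normalized = normalize_bone_name(bone_name)
--
--     # Try exact match first
--     for candidate in candidate_names:
--         if normalized == normalize_bone_name(candidate):
--             return candidate
--
--     # Try contains match
--     for candidate in candidate_names:
--         if normalize_bone_name(candidate) in normalized:
--             return candidate
--
--     # Try substring match (candidate in bone_name)
--     for candidate in candidate_names:
--         if candidate.lower() in normalized:
--             return candidate
--
--     return None
-- ===== SOURCE B (Python) =====
-- from typing import List, Optional
--
-- def normalize_bone_name(name: str) -> str:
--     return name.lower().strip()
--
-- def fuzzy_match_bone(bone_name: str, candidate_names: List[str]) -> Optional[str]: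
--     normalized = normalize_bone_name(bone_name)
--     best_prio = 3  # 0 = exact, 1 = normalized-contains, 2 = lowercase-contains, 3 = no match
--     best = None
--     for candidate in candidate_names:
--         n = normalize_bone_name(candidate)
--         if n == normalized:
--             return candidate  # level 0 cannot be beaten
--         if best_prio > 1 and n in normalized:
--             best_prio = 1
--             best = candidate
--         elif best_prio > 2 and candidate.lower() in normalized:
--             best_prio = 2
--             best = candidate
--     return best
-- ===== Notes on version B (the rewrite author's own statement) =====
-- stated objective: alternative
-- what changed: Replaced A's three ordered early-return scans by a single priority-selecting pass: one loop keeps the earliest candidate of the lowest match level (0 exact / 1 normalized-contains / 2 lowercase-contains), returning at once on an exact match and skipping tests for levels the current best already beats.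
import Mathlib
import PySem

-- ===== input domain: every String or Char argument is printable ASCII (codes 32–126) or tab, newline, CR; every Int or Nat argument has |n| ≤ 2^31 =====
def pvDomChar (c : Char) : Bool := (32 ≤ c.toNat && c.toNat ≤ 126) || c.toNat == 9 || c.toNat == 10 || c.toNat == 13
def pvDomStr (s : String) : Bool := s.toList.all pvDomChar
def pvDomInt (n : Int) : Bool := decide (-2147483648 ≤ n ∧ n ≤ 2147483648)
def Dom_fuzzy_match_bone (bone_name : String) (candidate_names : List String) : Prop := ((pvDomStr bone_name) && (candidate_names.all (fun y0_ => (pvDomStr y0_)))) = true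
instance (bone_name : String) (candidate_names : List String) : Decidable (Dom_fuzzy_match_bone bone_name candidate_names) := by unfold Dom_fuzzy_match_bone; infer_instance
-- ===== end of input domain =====

-- B replaces A's three ordered early-return scans with one priority-selecting pass (alternative decomposition, same cost).


-- shared module helper: normalize_bone_name(name) = name.lower().strip()
def pvNormalize (name : String) : String := PySem.Str.strip (PySem.Str.lower name)

-- ===== PORT A =====
-- first loop: exact match
def pvLoopExact (normalized : String) : List String → Option String
  | [] => none
  | c :: t => if pvNormalize c = normalized then some c else pvLoopExact normalized t

-- second loop: normalized candidate contained in normalized bone name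
def pvLoopContains (normalized : String) : List String → Option String
  | [] => none
  | c :: t => if PySem.Str.isIn (pvNormalize c) normalized then some c else pvLoopContains normalized t

-- third loop: candidate.lower() contained in normalized bone name
def pvLoopSub (normalized : String) : List String → Option String
  | [] => none
  | c :: t => if PySem.Str.isIn (PySem.Str.lower c) normalized then some c else pvLoopSub normalized t

def fuzzy_match_bone (bone_name : String) (candidate_names : List String) : Option String :=
  match pvLoopExact (pvNormalize bone_name) candidate_names with
  | some c => some c
  | none =>
    match pvLoopContains (pvNormalize bone_name) candidate_names with
    | some c => some c
    | none => pvLoopSub (pvNormalize bone_name) candidate_names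

-- ===== PORT B =====
-- the for-loop: acc = (best_prio, best); an exact match returns at once, and levels the
-- current best already beats are not tested (best_prio > 1 / best_prio > 2 guards)
def pvLoop (normalized : String) : List String → Nat × Option String → Option String
  | [], acc => acc.2
  | c :: t, acc =>
    if pvNormalize c = normalized then some c
    else if 1 < acc.1 ∧ PySem.Str.isIn (pvNormalize c) normalized = true then
      pvLoop normalized t (1, some c)
    else if 2 < acc.1 ∧ PySem.Str.isIn (PySem.Str.lower c) normalized = true then
      pvLoop normalized t (2, some c)
    else pvLoop normalized t acc

def fuzzy_match_bone_alt (bone_name : String) (candidate_names : List String) : Option String :=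
  pvLoop (pvNormalize bone_name) candidate_names (3, none)

-- ===== PRECONDITION & SPEC =====
def Spec_fuzzy_match_bone (bone_name : String) (candidate_names : List String) (out : Option String) : Prop := out = fuzzy_match_bone_alt bone_name candidate_names
instance (bone_name : String) (candidate_names : List String) (out : Option String) : Decidable (Spec_fuzzy_match_bone bone_name candidate_names out) := by unfold Spec_fuzzy_match_bone; infer_instance

-- ===== CLAIM (what is proved, stated in full; the proofs are below) =====
def Claim_equal_fuzzy_match_bone : Prop := ∀ (bone_name : String) (candidate_names : List String), Dom_fuzzy_match_bone bone_name candidate_names → Spec_fuzzy_match_bone bone_name candidate_names (fuzzy_match_bone bone_name candidate_names)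

-- ===== LEMMAS AND PROOFS =====

-- match level 0/1/2/3 of a candidate, and the unguarded one-pass loop body; pvLoop is
-- related to a plain fold over pvStep, which is then characterised by pvFirstMin
def pvPrio (normalized c : String) : Nat :=
  if pvNormalize c = normalized then 0
  else if PySem.Str.isIn (pvNormalize c) normalized then 1
  else if PySem.Str.isIn (PySem.Str.lower c) normalized then 2
  else 3

-- loop body: keep (best_prio, best); strict improvement only, so the earliest wins ties
def pvStep (normalized : String) (acc : Nat × Option String) (c : String) : Nat × Option String :=
  if pvPrio normalized c < acc.1 then (pvPrio normalized c, some c) else acc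

-- earliest candidate of minimal priority, with its priority
def pvFirstMin (normalized : String) : List String → Option (Nat × String)
  | [] => none
  | c :: t =>
    match pvFirstMin normalized t with
    | none => some (pvPrio normalized c, c)
    | some (q, d) => if pvPrio normalized c ≤ q then some (pvPrio normalized c, c) else some (q, d)

theorem pvPrio_le_three (n c : String) : pvPrio n c ≤ 3 := by
  unfold pvPrio; split_ifs <;> omega

theorem pvPrio_eq_zero_iff (n c : String) : pvPrio n c = 0 ↔ pvNormalize c = n := by
  unfold pvPrio
  split_ifs with h1 h2 h3
  · exact iff_of_true rfl h1
  · exact iff_of_false (by decide) h1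
  · exact iff_of_false (by decide) h1
  · exact iff_of_false (by decide) h1

theorem pvPrio_eq_one_iff (n c : String) (h : 1 ≤ pvPrio n c) :
    pvPrio n c = 1 ↔ PySem.Str.isIn (pvNormalize c) n = true := by
  unfold pvPrio at h ⊢
  split_ifs at h ⊢ with h1 h2 h3
  · exact absurd h (by decide)
  · exact iff_of_true rfl h2
  · exact iff_of_false (by decide) h2
  · exact iff_of_false (by decide) h2

theorem pvPrio_eq_two_iff (n c : String) (h : 2 ≤ pvPrio n c) :
    pvPrio n c = 2 ↔ PySem.Str.isIn (PySem.Str.lower c) n = true := by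
  unfold pvPrio at h ⊢
  split_ifs at h ⊢ with h1 h2 h3
  · exact absurd h (by decide)
  · exact absurd h (by decide)
  · exact iff_of_true rfl h3
  · exact iff_of_false (by decide) h3

theorem pvFirstMin_none (n : String) (t : List String) (h : pvFirstMin n t = none) : t = [] := by
  cases t with
  | nil => rfl
  | cons c t =>
    exfalso
    simp only [pvFirstMin] at h
    cases hm : pvFirstMin n t with
    | none =>
      rw [hm] at h
      exact absurd (show some (pvPrio n c, c) = none from h) (by simp)
    | some p =>
      obtain ⟨q, d⟩ := p
      rw [hm] at h
      dsimp only at h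
      split_ifs at h

theorem pvFirstMin_le (n : String) (t : List String) (q : Nat) (d : String)
    (h : pvFirstMin n t = some (q, d)) : q ≤ 3 := by
  induction t generalizing q d with
  | nil => simp [pvFirstMin] at h
  | cons c t ih =>
    simp only [pvFirstMin] at h
    cases hm : pvFirstMin n t with
    | none =>
      rw [hm] at h; dsimp only at h
      simp at h
      obtain ⟨h1, _⟩ := h
      exact h1 ▸ pvPrio_le_three n c
    | some p =>
      obtain ⟨q', d'⟩ := p
      rw [hm] at h; dsimp only at h
      split_ifs at h with hle <;> simp at h
      · obtain ⟨h1, _⟩ := h; exact h1 ▸ pvPrio_le_three n c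
      · obtain ⟨h1, _⟩ := h; exact h1 ▸ ih q' d' hm

-- B's fold characterised by pvFirstMin
theorem pvFold_eq (n : String) (t : List String) (bp : Nat) (bc : Option String) :
    t.foldl (pvStep n) (bp, bc) =
      match pvFirstMin n t with
      | none => (bp, bc)
      | some (q, d) => if q < bp then (q, some d) else (bp, bc) := by
  induction t generalizing bp bc with
  | nil => simp [pvFirstMin]
  | cons c t ih =>
    have hstep : pvStep n (bp, bc) c =
        if pvPrio n c < bp then (pvPrio n c, some c) else (bp, bc) := rfl
    rw [List.foldl_cons, hstep]
    simp only [pvFirstMin]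
    cases hm : pvFirstMin n t with
    | none =>
      have ht := pvFirstMin_none n t hm
      subst ht
      rfl
    | some p =>
      obtain ⟨q, d⟩ := p
      by_cases hp : pvPrio n c < bp
      · rw [if_pos hp, ih, hm]
        dsimp only
        by_cases hq : pvPrio n c ≤ q
        · rw [if_pos hq, if_neg (show ¬ q < pvPrio n c by omega)]
          dsimp only
          rw [if_pos hp]
        · rw [if_neg hq, if_pos (show q < pvPrio n c by omega)]
          dsimp only
          rw [if_pos (show q < bp by omega)]
      · rw [if_neg hp, ih, hm]
        dsimp only
        by_cases hq : pvPrio n c ≤ q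
        · rw [if_pos hq, if_neg (show ¬ q < bp by omega)]
          dsimp only
          rw [if_neg hp]
        · rw [if_neg hq]

-- the guarded loop computes the '.2' of the plain fold (invariant: 1 ≤ best_prio ≤ 3)
theorem pvLoop_eq_foldl (n : String) (t : List String) (acc : Nat × Option String)
    (h1 : 1 ≤ acc.1) (h3 : acc.1 ≤ 3) :
    pvLoop n t acc = (t.foldl (pvStep n) acc).2 := by
  induction t generalizing acc with
  | nil => rfl
  | cons c t ih =>
    obtain ⟨bp, bc⟩ := acc
    simp only at h1 h3
    have hstep : pvStep n (bp, bc) c =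
        if pvPrio n c < bp then (pvPrio n c, some c) else (bp, bc) := rfl
    simp only [pvLoop, List.foldl_cons, hstep]
    by_cases he : pvNormalize c = n
    · have hp : pvPrio n c = 0 := (pvPrio_eq_zero_iff n c).mpr he
      rw [if_pos he, hp, if_pos (by omega : (0:ℕ) < bp), pvFold_eq]
      cases hm : pvFirstMin n t with
      | none => rfl
      | some p =>
        obtain ⟨q, d⟩ := p
        dsimp only
        rw [if_neg (by omega : ¬ q < 0)]
    · rw [if_neg he]
      by_cases hin1 : PySem.Str.isIn (pvNormalize c) n = true
      · have hp : pvPrio n c = 1 := by unfold pvPrio; rw [if_neg he, if_pos hin1]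
        rw [hp]
        by_cases hbp1 : 1 < bp
        · rw [if_pos ⟨hbp1, hin1⟩, if_pos hbp1]
          exact ih (1, some c) (by omega) (by omega)
        · rw [if_neg (fun hh => hbp1 hh.1),
              if_neg (fun hh => absurd hh.1 (by omega : ¬ 2 < bp)), if_neg hbp1]
          exact ih (bp, bc) h1 h3
      · rw [if_neg (fun hh => hin1 hh.2)]
        by_cases hin2 : PySem.Str.isIn (PySem.Str.lower c) n = true
        · have hp : pvPrio n c = 2 := by unfold pvPrio; rw [if_neg he, if_neg hin1, if_pos hin2]
          rw [hp]
          by_cases hbp2 : 2 < bp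
          · rw [if_pos ⟨hbp2, hin2⟩, if_pos hbp2]
            exact ih (2, some c) (by omega) (by omega)
          · rw [if_neg (fun hh => hbp2 hh.1), if_neg hbp2]
            exact ih (bp, bc) h1 h3
        · have hp : pvPrio n c = 3 := by unfold pvPrio; rw [if_neg he, if_neg hin1, if_neg hin2]
          rw [if_neg (fun hh => hin2 hh.2), hp, if_neg (by omega : ¬ (3:ℕ) < bp)]
          exact ih (bp, bc) h1 h3

theorem pvLoopExact_eq (n : String) (t : List String) (q : Nat) (d : String)
    (h : pvFirstMin n t = some (q, d)) :
    pvLoopExact n t = if q = 0 then some d else none := by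
  induction t generalizing q d with
  | nil => simp [pvFirstMin] at h
  | cons c t ih =>
    simp only [pvFirstMin] at h
    simp only [pvLoopExact]
    cases hm : pvFirstMin n t with
    | none =>
      have ht := pvFirstMin_none n t hm
      subst ht
      rw [hm] at h; dsimp only at h
      simp at h
      obtain ⟨h1, h2⟩ := h; subst h1; subst h2
      by_cases hz : pvNormalize c = n
      · rw [if_pos hz, if_pos ((pvPrio_eq_zero_iff n c).mpr hz)]
      · have hnz : pvPrio n c ≠ 0 := fun hh => hz ((pvPrio_eq_zero_iff n c).mp hh)
        rw [if_neg hz, if_neg hnz]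
        rfl
    | some p =>
      obtain ⟨q', d'⟩ := p
      rw [hm] at h; dsimp only at h
      split_ifs at h with hle <;> simp at h <;> obtain ⟨h1, h2⟩ := h <;> subst h1 <;> subst h2
      · by_cases hz : pvNormalize c = n
        · rw [if_pos hz, if_pos ((pvPrio_eq_zero_iff n c).mpr hz)]
        · have hnz : pvPrio n c ≠ 0 := fun hh => hz ((pvPrio_eq_zero_iff n c).mp hh)
          rw [if_neg hz, if_neg hnz, ih q' d' hm, if_neg (by omega : ¬ q' = 0)]
      · have hz : ¬ pvNormalize c = n := by
          intro he
          have := (pvPrio_eq_zero_iff n c).mpr he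
          omega
        rw [if_neg hz]
        exact ih q' d' hm

theorem pvLoopContains_eq (n : String) (t : List String) (q : Nat) (d : String)
    (h : pvFirstMin n t = some (q, d)) (hq : 1 ≤ q) :
    pvLoopContains n t = if q = 1 then some d else none := by
  induction t generalizing q d with
  | nil => simp [pvFirstMin] at h
  | cons c t ih =>
    simp only [pvFirstMin] at h
    simp only [pvLoopContains]
    cases hm : pvFirstMin n t with
    | none =>
      have ht := pvFirstMin_none n t hm
      subst ht
      rw [hm] at h; dsimp only at h
      simp at h
      obtain ⟨h1, h2⟩ := h; subst h1; subst h2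
      by_cases hz : PySem.Str.isIn (pvNormalize c) n = true
      · rw [if_pos hz, if_pos ((pvPrio_eq_one_iff n c hq).mpr hz)]
      · have hnz : pvPrio n c ≠ 1 := fun hh => hz ((pvPrio_eq_one_iff n c hq).mp hh)
        rw [if_neg hz, if_neg hnz]
        rfl
    | some p =>
      obtain ⟨q', d'⟩ := p
      rw [hm] at h; dsimp only at h
      split_ifs at h with hle <;> simp at h <;> obtain ⟨h1, h2⟩ := h <;> subst h1 <;> subst h2
      · by_cases hz : PySem.Str.isIn (pvNormalize c) n = true
        · rw [if_pos hz, if_pos ((pvPrio_eq_one_iff n c hq).mpr hz)]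
        · have hnz : pvPrio n c ≠ 1 := fun hh => hz ((pvPrio_eq_one_iff n c hq).mp hh)
          rw [if_neg hz, if_neg hnz, ih q' d' hm (le_trans hq hle), if_neg (by omega : ¬ q' = 1)]
      · have hpc : 1 ≤ pvPrio n c := by omega
        have hz : ¬ PySem.Str.isIn (pvNormalize c) n = true := by
          intro hh
          have := (pvPrio_eq_one_iff n c hpc).mpr hh
          omega
        rw [if_neg hz]
        exact ih q' d' hm hq

theorem pvLoopSub_eq (n : String) (t : List String) (q : Nat) (d : String)
    (h : pvFirstMin n t = some (q, d)) (hq : 2 ≤ q) :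
    pvLoopSub n t = if q = 2 then some d else none := by
  induction t generalizing q d with
  | nil => simp [pvFirstMin] at h
  | cons c t ih =>
    simp only [pvFirstMin] at h
    simp only [pvLoopSub]
    cases hm : pvFirstMin n t with
    | none =>
      have ht := pvFirstMin_none n t hm
      subst ht
      rw [hm] at h; dsimp only at h
      simp at h
      obtain ⟨h1, h2⟩ := h; subst h1; subst h2
      by_cases hz : PySem.Str.isIn (PySem.Str.lower c) n = true
      · rw [if_pos hz, if_pos ((pvPrio_eq_two_iff n c hq).mpr hz)]
      · have hnz : pvPrio n c ≠ 2 := fun hh => hz ((pvPrio_eq_two_iff n c hq).mp hh)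
        rw [if_neg hz, if_neg hnz]
        rfl
    | some p =>
      obtain ⟨q', d'⟩ := p
      rw [hm] at h; dsimp only at h
      split_ifs at h with hle <;> simp at h <;> obtain ⟨h1, h2⟩ := h <;> subst h1 <;> subst h2
      · by_cases hz : PySem.Str.isIn (PySem.Str.lower c) n = true
        · rw [if_pos hz, if_pos ((pvPrio_eq_two_iff n c hq).mpr hz)]
        · have hnz : pvPrio n c ≠ 2 := fun hh => hz ((pvPrio_eq_two_iff n c hq).mp hh)
          rw [if_neg hz, if_neg hnz, ih q' d' hm (le_trans hq hle), if_neg (by omega : ¬ q' = 2)]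
      · have hpc : 2 ≤ pvPrio n c := by omega
        have hz : ¬ PySem.Str.isIn (PySem.Str.lower c) n = true := by
          intro hh
          have := (pvPrio_eq_two_iff n c hpc).mpr hh
          omega
        rw [if_neg hz]
        exact ih q' d' hm hq

-- ===== VERDICT (by name: the statement is the Claim_ definition above) =====
theorem fuzzy_match_bone_spec : Claim_equal_fuzzy_match_bone := by
  intro bn cs _
  unfold Spec_fuzzy_match_bone fuzzy_match_bone fuzzy_match_bone_alt
  generalize pvNormalize bn = n
  rw [pvLoop_eq_foldl n cs (3, none) (by decide) (by decide), pvFold_eq]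
  cases hm : pvFirstMin n cs with
  | none =>
    have ht := pvFirstMin_none n cs hm
    subst ht
    rfl
  | some p =>
    obtain ⟨q, d⟩ := p
    have hq3 := pvFirstMin_le n cs q d hm
    rw [pvLoopExact_eq n cs q d hm]
    interval_cases q
    · simp
    · rw [pvLoopContains_eq n cs 1 d hm (by omega)]; simp
    · rw [pvLoopContains_eq n cs 2 d hm (by omega), pvLoopSub_eq n cs 2 d hm (by omega)]; simp
    · rw [pvLoopContains_eq n cs 3 d hm (by omega), pvLoopSub_eq n cs 3 d hm (by omega)]; simp
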